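-- pv_equiv track=rewrite | github.com/roeishc/leetcode | solutions/python3/TakeKOfEachCharacterFromLeftAndRight.py | takeCharacters
-- ===== SOURCE A (Python) =====
-- def takeCharacters(s: str, k: int) -> int:
--
--     count = [0, 0, 0]
--     for c in s:
--         count[ord(c) - ord('a')] += 1
--
--     if min(count) < k:
--         return -1
--
--     max_window_len = 0
--     l = 0
--     for r in range(len(s)):
--         count[ord(s[r]) - ord('a')] -= 1
--         while min(count) < k:
--             count[ord(s[l]) - ord('a')] += 1
--             l += 1
--         max_window_len = max(max_window_len, r - l + 1)
--
--     return len(s) - max_window_len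
-- ===== SOURCE B (Python) =====
-- def takeCharacters(s: str, k: int) -> int:
--     # Prefix-count tables + per-left-size binary search for the smallest right
--     # take, instead of A's sliding window.
--     cs = list(s)
--     n = len(cs)
--
--     pre = [[0, 0, 0]]
--     for ch in cs:
--         c = pre[-1][:]
--         c[ord(ch) - ord('a')] += 1
--         pre.append(c)
--     total = pre[n]
--     if min(total) < k:
--         return -1
--
--     best = n
--     for i in range(n + 1):
--         # smallest j with prefix i + suffix j containing >= k of each letter
--         lo, hi = 0, n - i
--         while lo < hi:
--             mid = (lo + hi) // 2
--             if all(pre[i][t] + total[t] - pre[n - mid][t] >= k for t in range(3)):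
--                 hi = mid
--             else:
--                 lo = mid + 1
--         best = min(best, i + lo)
--     return best
-- ===== Notes on version B (the rewrite author's own statement) =====
-- stated objective: alternative
-- what changed: Replaced the sliding-window scan with precomputed prefix-count tables and, for each left take size, a binary search for the smallest feasible right take size.
import Mathlib
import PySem

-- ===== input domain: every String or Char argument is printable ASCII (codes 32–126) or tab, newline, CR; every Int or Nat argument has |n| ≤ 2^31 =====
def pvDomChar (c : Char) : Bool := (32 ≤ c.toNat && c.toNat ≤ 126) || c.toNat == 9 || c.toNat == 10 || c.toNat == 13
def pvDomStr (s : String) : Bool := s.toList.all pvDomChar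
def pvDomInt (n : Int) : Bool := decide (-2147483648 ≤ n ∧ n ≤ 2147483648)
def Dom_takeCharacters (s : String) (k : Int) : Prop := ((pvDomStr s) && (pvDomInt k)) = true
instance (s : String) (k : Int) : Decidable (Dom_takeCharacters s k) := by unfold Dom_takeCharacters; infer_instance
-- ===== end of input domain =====

-- B replaces A's sliding window by prefix-count tables with a binary search for
-- the smallest feasible right take per left take size (alternative algorithm).

-- ===== PORT A =====

-- Python `cnt[i] += d` on a list (negative index counts from the end); an
-- out-of-range index raises IndexError in Python — excluded by Pre_ — and is a
-- no-op here.
def pvBump3 (cnt : List Int) (i d : Int) : List Int :=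
  let j : Int := if i < 0 then i + (cnt.length : Int) else i
  if 0 ≤ j ∧ j < (cnt.length : Int) then
    cnt.set j.toNat ((cnt[j.toNat]?.getD 0) + d)
  else cnt

-- Python `min(xs)` for a never-empty list of ints.
def pvMin0 (xs : List Int) : Int := (PySem.List.min? xs id).getD 0

-- the inner `while min(count) < k` loop of A; fuel `len(s)+1` is never
-- exhausted on Pre_ inputs (the left pointer never passes the window end).
def pvWhileA (cs : List Char) (k : Int) : Nat → List Int → Int → List Int × Int
  | 0, cnt, l => (cnt, l)
  | fuel + 1, cnt, l =>
      if pvMin0 cnt < k then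
        pvWhileA cs k fuel
          (pvBump3 cnt ((((PySem.List.pyGet? cs l).getD 'a').toNat : Int) - 97) 1)
          (l + 1)
      else (cnt, l)

def takeCharacters (s : String) (k : Int) : Int :=
  let cs := s.toList
  let count := cs.foldl (fun cnt c => pvBump3 cnt ((c.toNat : Int) - 97) 1) [0, 0, 0]
  if pvMin0 count < k then -1
  else
    let fin := (PySem.List.pyRange 0 (cs.length : Int) 1).foldl
      (fun (st : List Int × Int × Int) r =>
        let cnt1 := pvBump3 st.1 ((((PySem.List.pyGet? cs r).getD 'a').toNat : Int) - 97) (-1)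
        let p := pvWhileA cs k (cs.length + 1) cnt1 st.2.1
        (p.1, p.2, max st.2.2 (r - p.2 + 1)))
      (count, (0 : Int), (0 : Int))
    (cs.length : Int) - fin.2.2

-- ===== PORT B =====

-- `all(pre[i][t] + total[t] - pre[n-j][t] >= k for t in range(3))`
def pvOkB (pre : List (List Int)) (total : List Int) (k n i j : Int) : Bool :=
  (PySem.List.pyRange 0 3 1).all fun t =>
    decide (k ≤ ((PySem.List.pyGet? ((PySem.List.pyGet? pre i).getD []) t).getD 0)
              + ((PySem.List.pyGet? total t).getD 0)
              - ((PySem.List.pyGet? ((PySem.List.pyGet? pre (n - j)).getD []) t).getD 0))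

-- the `while lo < hi` binary search of B
def pvBsearch (pre : List (List Int)) (total : List Int) (k n i : Int) (lo hi : Int) : Int :=
  if h : lo < hi then
    let mid := PySem.Int.floordiv (lo + hi) 2
    if pvOkB pre total k n i mid then pvBsearch pre total k n i lo mid
    else pvBsearch pre total k n i (mid + 1) hi
  else lo
termination_by (hi - lo).toNat
decreasing_by
  · have h2 : PySem.Int.floordiv (lo + hi) 2 < hi := by
      rw [PySem.Int.floordiv_lt_iff_lt_mul (by norm_num)]; omega
    omega
  · have h1 := PySem.Int.floordiv_two_mid_bounds (le_of_lt h)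
    omega

def takeCharacters_alt (s : String) (k : Int) : Int :=
  let cs := s.toList
  let n : Int := cs.length
  let pre := cs.foldl
    (fun (pre : List (List Int)) ch =>
      pre ++ [pvBump3 ((PySem.List.pyGet? pre (-1)).getD []) ((ch.toNat : Int) - 97) 1])
    [[0, 0, 0]]
  let total := (PySem.List.pyGet? pre n).getD []
  if pvMin0 total < k then -1
  else
    (PySem.List.pyRange 0 (n + 1) 1).foldl
      (fun best i => min best (i + pvBsearch pre total k n i 0 (n - i)))
      n

-- ===== PRECONDITION & SPEC =====

-- Pre_ is exactly the set of inputs on which the Python A returns: any character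
-- outside '^'..'c' (codes 94..99) makes `count[ord(c) - ord('a')]` raise
-- IndexError (codes 94..96 are accepted via Python's negative-index rule).
def Pre_takeCharacters (s : String) (k : Int) : Prop :=
  (s.toList.all (fun c => 94 ≤ c.toNat && c.toNat ≤ 99)) = true
instance (s : String) (k : Int) : Decidable (Pre_takeCharacters s k) := by
  unfold Pre_takeCharacters; infer_instance

def pvWitness_takeCharacters : String × Int := ("abcba", 1)

def Spec_takeCharacters (s : String) (k : Int) (out : Int) : Prop := out = takeCharacters_alt s k
instance (s : String) (k : Int) (out : Int) : Decidable (Spec_takeCharacters s k out) := by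
  unfold Spec_takeCharacters; infer_instance

-- ===== CLAIM (what is proved, stated in full; the proofs are below) =====
def Claim_equal_takeCharacters : Prop := ∀ (s : String) (k : Int), Dom_takeCharacters s k → Pre_takeCharacters s k → Spec_takeCharacters s k (takeCharacters s k)

-- ===== LEMMAS AND PROOFS =====

-- the class (0 = 'a', 1 = 'b', 2 = 'c') a character is counted under, matching
-- Python's wrapped list index for codes 94..99
def pvCl (c : Char) : Int := ((c.toNat : Int) - 97) % 3

def pvCnt (t : Int) (u : List Char) : Int := (u.countP (fun c => decide (pvCl c = t)) : Int)

def pvVec (u : List Char) : List Int := [pvCnt 0 u, pvCnt 1 u, pvCnt 2 u]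

-- the characters OUTSIDE the window [l, m)
def pvOut (cs : List Char) (l m : Nat) : List Char := cs.take l ++ cs.drop m

def pvFeas (cs : List Char) (k : Int) (l m : Nat) : Prop :=
  k ≤ pvCnt 0 (pvOut cs l m) ∧ k ≤ pvCnt 1 (pvOut cs l m) ∧ k ≤ pvCnt 2 (pvOut cs l m)

def pvGood (cs : List Char) : Prop := ∀ c ∈ cs, 94 ≤ c.toNat ∧ c.toNat ≤ 99

def pvPre (cs : List Char) : List (List Int) :=
  (List.range (cs.length + 1)).map (fun i => pvVec (cs.take i))

theorem pv_min3_lt (x y z k : Int) : (pvMin0 [x, y, z] < k) ↔ (x < k ∨ y < k ∨ z < k) := by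
  unfold pvMin0 PySem.List.min?
  by_cases h1 : y < x <;> by_cases h2 : z < y <;> by_cases h3 : z < x <;>
    simp [List.foldl, h1, h2, h3] <;> omega

theorem pv_bump3_eq (x y z i d : Int) (h1 : -3 ≤ i) (h2 : i ≤ 2) :
    pvBump3 [x, y, z] i d =
      [x + (if i % 3 = 0 then d else 0), y + (if i % 3 = 1 then d else 0),
       z + (if i % 3 = 2 then d else 0)] := by
  interval_cases i <;> simp [pvBump3]

theorem pv_cnt_append (t : Int) (u v : List Char) :
    pvCnt t (u ++ v) = pvCnt t u + pvCnt t v := by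
  simp [pvCnt, List.countP_append]

theorem pv_cl_cases (c : Char) : pvCl c = 0 ∨ pvCl c = 1 ∨ pvCl c = 2 := by
  have h1 : 0 ≤ pvCl c := Int.emod_nonneg _ (by norm_num)
  have h2 : pvCl c < 3 := Int.emod_lt_of_pos _ (by norm_num)
  omega

theorem pv_cl_eq (c : Char) : ((c.toNat : Int) - 97) % 3 = pvCl c := rfl

theorem pv_cnt_singleton (t : Int) (c : Char) :
    pvCnt t [c] = if pvCl c = t then 1 else 0 := by
  by_cases h : pvCl c = t <;> simp [pvCnt, h]

theorem pv_bump_vec_add (w : List Char) (c : Char) (hc : 94 ≤ c.toNat ∧ c.toNat ≤ 99) :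
    pvBump3 (pvVec w) ((c.toNat : Int) - 97) 1 = pvVec (w ++ [c]) := by
  have hr : -3 ≤ (c.toNat : Int) - 97 ∧ (c.toNat : Int) - 97 ≤ 2 := by omega
  rw [show pvVec w = [pvCnt 0 w, pvCnt 1 w, pvCnt 2 w] from rfl,
      pv_bump3_eq _ _ _ _ _ hr.1 hr.2]
  simp only [pvVec, pv_cnt_append, pv_cnt_singleton, pv_cl_eq c]
  rcases pv_cl_cases c with h | h | h <;> simp [h]

theorem pv_bump_vec_sub (w : List Char) (c : Char) (hc : 94 ≤ c.toNat ∧ c.toNat ≤ 99) :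
    pvBump3 (pvVec (w ++ [c])) ((c.toNat : Int) - 97) (-1) = pvVec w := by
  have hr : -3 ≤ (c.toNat : Int) - 97 ∧ (c.toNat : Int) - 97 ≤ 2 := by omega
  rw [show pvVec (w ++ [c]) = [pvCnt 0 (w ++ [c]), pvCnt 1 (w ++ [c]), pvCnt 2 (w ++ [c])] from rfl,
      pv_bump3_eq _ _ _ _ _ hr.1 hr.2]
  simp only [pvVec, pv_cnt_append, pv_cnt_singleton, pv_cl_eq c]
  rcases pv_cl_cases c with h | h | h <;> simp [h]

theorem pv_vec_perm_mid (u v : List Char) (c : Char) :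
    pvVec (u ++ c :: v) = pvVec ((u ++ v) ++ [c]) := by
  simp only [pvVec, pvCnt, List.countP_append, List.countP_cons]
  simp; omega

theorem pv_min_vec (w : List Char) (k : Int) :
    pvMin0 (pvVec w) < k ↔ ¬ (k ≤ pvCnt 0 w ∧ k ≤ pvCnt 1 w ∧ k ≤ pvCnt 2 w) := by
  rw [show pvVec w = [pvCnt 0 w, pvCnt 1 w, pvCnt 2 w] from rfl, pv_min3_lt]; omega

theorem pv_cnt_drop_le (t : Int) (w : List Char) (m : Nat) :
    pvCnt t (w.drop (m + 1)) ≤ pvCnt t (w.drop m) := by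
  have : w.drop (m + 1) = (w.drop m).drop 1 := by rw [List.drop_drop]
  rw [this]
  unfold pvCnt
  exact_mod_cast List.Sublist.countP_le (List.drop_sublist _ _)

theorem pv_feas_mono_m (cs : List Char) (k : Int) (l m : Nat) :
    pvFeas cs k l (m + 1) → pvFeas cs k l m := by
  intro hf
  refine ⟨?_, ?_, ?_⟩ <;>
  · rw [pvOut, pv_cnt_append]
    have := pv_cnt_drop_le (t := 0) cs m
    have := pv_cnt_drop_le (t := 1) cs m
    have := pv_cnt_drop_le (t := 2) cs m
    obtain ⟨h0, h1, h2⟩ := hf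
    rw [pvOut, pv_cnt_append] at h0 h1 h2
    omega

theorem pv_out_self (cs : List Char) (m : Nat) : pvOut cs m m = cs := by
  simp [pvOut]

theorem pv_feas_mm (cs : List Char) (k : Int)
    (htot : k ≤ pvCnt 0 cs ∧ k ≤ pvCnt 1 cs ∧ k ≤ pvCnt 2 cs) (m : Nat) :
    pvFeas cs k m m := by
  unfold pvFeas; rw [pv_out_self]; exact htot

theorem pv_vec_nil : pvVec [] = [0, 0, 0] := by
  simp [pvVec, pvCnt]

theorem pv_phase1 (l : List Char) :
    ∀ u, pvGood l →
      l.foldl (fun cnt c => pvBump3 cnt ((c.toNat : Int) - 97) 1) (pvVec u) = pvVec (u ++ l) := by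
  induction l with
  | nil => intro u _; simp
  | cons c rest ih =>
    intro u hg
    have hc := hg c (by simp)
    have hrest : pvGood rest := fun x hx => hg x (by simp [hx])
    simp only [List.foldl_cons, pv_bump_vec_add u c hc]
    rw [ih (u ++ [c]) hrest]; simp

-- cs[l] read through Python indexing
theorem pv_get_char (cs : List Char) (l : Nat) (h : l < cs.length) :
    (PySem.List.pyGet? cs (l : Int)).getD 'a' = cs[l] := by
  rw [PySem.List.pyGet?_natCast]; simp [List.getElem?_eq_getElem h]

-- drop m = cs[m] :: drop (m+1), as a pvVec/bump fact used by both loops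
theorem pv_bump_out_sub (cs : List Char) (l m : Nat) (hm : m < cs.length)
    (hc : 94 ≤ cs[m].toNat ∧ cs[m].toNat ≤ 99) :
    pvBump3 (pvVec (pvOut cs l m)) ((cs[m].toNat : Int) - 97) (-1) = pvVec (pvOut cs l (m + 1)) := by
  have hd : cs.drop m = cs[m] :: cs.drop (m + 1) := List.drop_eq_getElem_cons hm
  rw [pvOut, hd, pv_vec_perm_mid, pv_bump_vec_sub _ _ hc]; rfl

theorem pv_bump_out_add (cs : List Char) (l m : Nat) (hl : l < cs.length)
    (hc : 94 ≤ cs[l].toNat ∧ cs[l].toNat ≤ 99) :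
    pvBump3 (pvVec (pvOut cs l m)) ((cs[l].toNat : Int) - 97) 1 = pvVec (pvOut cs (l + 1) m) := by
  rw [pvOut, pv_bump_vec_add _ _ hc, pvOut]
  rw [← pv_vec_perm_mid (cs.take l) (cs.drop m) cs[l]]
  congr 1
  rw [List.take_add_one, List.getElem?_eq_getElem hl]
  simp only [Option.toList_some, List.append_assoc, List.singleton_append]

theorem pv_min_feas (cs : List Char) (k : Int) (l m : Nat) :
    pvMin0 (pvVec (pvOut cs l m)) < k ↔ ¬ pvFeas cs k l m := by
  rw [pv_min_vec]; unfold pvFeas; tauto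

-- ===== the inner while loop =====
theorem pv_while_spec (cs : List Char) (k : Int) (hg : pvGood cs)
    (m : Nat) (hm : m ≤ cs.length)
    (htot : k ≤ pvCnt 0 cs ∧ k ≤ pvCnt 1 cs ∧ k ≤ pvCnt 2 cs) :
    ∀ (fuel : Nat) (l : Nat), l ≤ m → m - l < fuel →
    ∃ L, l ≤ L ∧ L ≤ m ∧ pvFeas cs k L m ∧ (∀ x, l ≤ x → x < L → ¬ pvFeas cs k x m) ∧
      pvWhileA cs k fuel (pvVec (pvOut cs l m)) (l : Int) = (pvVec (pvOut cs L m), (L : Int)) := by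
  intro fuel
  induction fuel with
  | zero => intro l _ h; omega
  | succ f ih =>
    intro l hl hfuel
    by_cases hc : pvMin0 (pvVec (pvOut cs l m)) < k
    · have hnf : ¬ pvFeas cs k l m := (pv_min_feas cs k l m).mp hc
      have hlm : l < m := by
        rcases Nat.lt_or_ge l m with h | h
        · exact h
        · exact absurd (pv_feas_mm cs k htot m) (by
            have : l = m := by omega
            rw [this] at hnf; exact hnf)
      have hglt : l < cs.length := by omega
      have hcc := hg cs[l] (List.getElem_mem hglt)
      obtain ⟨L, hL1, hL2, hL3, hL4, hL5⟩ := ih (l + 1) (by omega) (by omega)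
      refine ⟨L, by omega, hL2, hL3, ?_, ?_⟩
      · intro x hx1 hx2
        rcases Nat.eq_or_lt_of_le hx1 with rfl | h
        · exact hnf
        · exact hL4 x (by omega) hx2
      · show pvWhileA cs k (f + 1) (pvVec (pvOut cs l m)) (l : Int) = _
        rw [pvWhileA, if_pos hc, pv_get_char cs l hglt, pv_bump_out_add cs l m hglt hcc]
        rw [show ((l : Int) + 1) = ((l + 1 : Nat) : Int) from by push_cast; ring]
        exact hL5
    · refine ⟨l, le_refl l, hl, ?_, by omega, ?_⟩
      · by_contra hnf
        exact hc ((pv_min_feas cs k l m).mpr hnf)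
      · show pvWhileA cs k (f + 1) (pvVec (pvOut cs l m)) (l : Int) = _
        rw [pvWhileA, if_neg hc]

-- ===== the outer for loop =====
theorem pv_outer_spec (cs : List Char) (k : Int) (hg : pvGood cs)
    (htot : k ≤ pvCnt 0 cs ∧ k ≤ pvCnt 1 cs ∧ k ≤ pvCnt 2 cs) :
    ∀ (m : Nat), m ≤ cs.length →
    ∃ (l : Nat) (w : Int),
      ((PySem.List.pyRange 0 (m : Int) 1).foldl
        (fun (st : List Int × Int × Int) r =>
          let cnt1 := pvBump3 st.1 ((((PySem.List.pyGet? cs r).getD 'a').toNat : Int) - 97) (-1)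
          let p := pvWhileA cs k (cs.length + 1) cnt1 st.2.1
          (p.1, p.2, max st.2.2 (r - p.2 + 1)))
        (pvVec cs, (0 : Int), (0 : Int))) = (pvVec (pvOut cs l m), (l : Int), w) ∧
      l ≤ m ∧ pvFeas cs k l m ∧ (∀ x, x < l → ¬ pvFeas cs k x m) ∧ 0 ≤ w ∧
      (∀ (m' x : Nat), x ≤ m' → m' ≤ m → pvFeas cs k x m' → (m' : Int) - (x : Int) ≤ w) ∧
      (w = 0 ∨ ∃ (m' x : Nat), x ≤ m' ∧ m' ≤ m ∧ pvFeas cs k x m' ∧ w = (m' : Int) - (x : Int)) := by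
  intro m
  induction m with
  | zero =>
    intro _
    refine ⟨0, 0, ?_, by omega, pv_feas_mm cs k htot 0, by omega, by omega, ?_, Or.inl rfl⟩
    · rw [show ((0 : Nat) : Int) = 0 from rfl]
      rw [show PySem.List.pyRange 0 0 1 = [] from by decide]
      simp [pv_out_self]
    · intro m' x h1 h2 _; omega
  | succ m ih =>
    intro hm1
    obtain ⟨l, w, hfold, hlm, hfeas, hmin, hw0, hub, hach⟩ := ih (by omega)
    have hmlen : m < cs.length := by omega
    have hcc := hg cs[m] (List.getElem_mem hmlen)
    obtain ⟨L, hL1, hL2, hL3, hL4, hL5⟩ :=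
      pv_while_spec cs k hg (m + 1) (by omega) htot (cs.length + 1) l (by omega) (by omega)
    refine ⟨L, max w ((m : Int) - (L : Int) + 1), ?_, hL2, hL3, ?_, ?_, ?_, ?_⟩
    · rw [show ((m + 1 : Nat) : Int) = (m : Int) + 1 from by push_cast; ring,
          PySem.List.pyRange_one_succ_right (by positivity), List.foldl_append, hfold]
      simp only [List.foldl]
      rw [pv_get_char cs m hmlen, pv_bump_out_sub cs l m hmlen hcc, hL5]
    · -- minimality over the full range
      intro x hx
      rcases Nat.lt_or_ge x l with h | h
      · intro hf
        exact hmin x h (pv_feas_mono_m cs k x m hf)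
      · exact hL4 x h hx
    · omega
    · intro m' x h1 h2 hf
      rcases Nat.lt_or_ge m' (m + 1) with h | h
      · have := hub m' x h1 (by omega) hf
        omega
      · have hm' : m' = m + 1 := by omega
        subst hm'
        have hxL : L ≤ x := by
          by_contra hxl
          push_neg at hxl
          rcases Nat.lt_or_ge x l with h' | h'
          · exact hmin x h' (pv_feas_mono_m cs k x m hf)
          · exact hL4 x h' hxl hf
        have : ((m + 1 : Nat) : Int) - (x : Int) ≤ (m : Int) - (L : Int) + 1 := by
          push_cast; omega
        omega
    · rcases max_choice w ((m : Int) - (L : Int) + 1) with h | h <;> rw [h]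
      · rcases hach with h' | ⟨m', x, a1, a2, a3, a4⟩
        · exact Or.inl h'
        · exact Or.inr ⟨m', x, a1, by omega, a3, a4⟩
      · rcases Nat.lt_or_ge m (L) with hl' | hl'
        · -- L = m + 1, length 0
          have : L = m + 1 := by omega
          exact Or.inl (by omega)
        · exact Or.inr ⟨m + 1, L, by omega, le_refl _, hL3, by push_cast; omega⟩

-- A's result characterized (totals ≥ k case)
theorem pv_A_char (cs : List Char) (k : Int) (hg : pvGood cs)
    (htot : k ≤ pvCnt 0 cs ∧ k ≤ pvCnt 1 cs ∧ k ≤ pvCnt 2 cs) :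
    ∃ (w : Int), 0 ≤ w ∧
      (∀ (m' x : Nat), x ≤ m' → m' ≤ cs.length → pvFeas cs k x m' → (m' : Int) - (x : Int) ≤ w) ∧
      (w = 0 ∨ ∃ (m' x : Nat), x ≤ m' ∧ m' ≤ cs.length ∧ pvFeas cs k x m' ∧ w = (m' : Int) - (x : Int)) ∧
      ((PySem.List.pyRange 0 (cs.length : Int) 1).foldl
        (fun (st : List Int × Int × Int) r =>
          let cnt1 := pvBump3 st.1 ((((PySem.List.pyGet? cs r).getD 'a').toNat : Int) - 97) (-1)
          let p := pvWhileA cs k (cs.length + 1) cnt1 st.2.1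
          (p.1, p.2, max st.2.2 (r - p.2 + 1)))
        (pvVec cs, (0 : Int), (0 : Int))).2.2 = w := by
  obtain ⟨l, w, hfold, _, _, _, hw0, hub, hach⟩ :=
    pv_outer_spec cs k hg htot cs.length (le_refl _)
  exact ⟨w, hw0, hub, hach, by rw [hfold]⟩

-- ===== B side =====
theorem pv_pre_build (cs : List Char) (hg : pvGood cs) :
    cs.foldl
      (fun (pre : List (List Int)) ch =>
        pre ++ [pvBump3 ((PySem.List.pyGet? pre (-1)).getD []) ((ch.toNat : Int) - 97) 1])
      [[0, 0, 0]] = pvPre cs := by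
  induction cs using List.reverseRecOn with
  | nil => simp [pvPre, pv_vec_nil]
  | append_singleton cs c ih =>
    have hgcs : pvGood cs := fun x hx => hg x (by simp [hx])
    have hc := hg c (by simp)
    rw [List.foldl_append, ih hgcs]
    simp only [List.foldl]
    have hlast : PySem.List.pyGet? (pvPre cs) (-1) = some (pvVec cs) := by
      unfold pvPre
      have : PySem.List.pyGet? ((List.range (cs.length + 1)).map (fun i => pvVec (cs.take i))) (-1)
          = some (pvVec (cs.take cs.length)) := by
        simp [PySem.List.pyGet?, PySem.List.pyIdx?]
      rw [this, List.take_length]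
    rw [hlast]
    simp only [Option.getD_some]
    rw [pv_bump_vec_add cs c hc]
    unfold pvPre
    rw [List.length_append, List.length_singleton, List.range_succ (n := cs.length + 1)]
    rw [List.map_append]
    congr 1
    · apply List.map_congr_left
      intro i hi
      have : i ≤ cs.length := by
        have := List.mem_range.mp hi; omega
      rw [List.take_append_of_le_length this]
    · simp [List.take_of_length_le]

theorem pv_get_pre (cs : List Char) (i : Nat) (h : i ≤ cs.length) :
    PySem.List.pyGet? (pvPre cs) (i : Int) = some (pvVec (cs.take i)) := by
  unfold pvPre
  rw [PySem.List.pyGet?_natCast]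
  simp [Nat.lt_succ_of_le h]

theorem pv_cnt_drop (t : Int) (cs : List Char) (m : Nat) :
    pvCnt t (cs.drop m) = pvCnt t cs - pvCnt t (cs.take m) := by
  have := pv_cnt_append t (cs.take m) (cs.drop m)
  rw [List.take_append_drop] at this
  omega

theorem pv_okB_iff (cs : List Char) (k : Int) (i j : Nat)
    (hi : i ≤ cs.length) (hj : j ≤ cs.length - i) :
    pvOkB (pvPre cs) (pvVec cs) k (cs.length : Int) (i : Int) (j : Int) = true
      ↔ pvFeas cs k i (cs.length - j) := by
  have hnj : (cs.length : Int) - (j : Int) = ((cs.length - j : Nat) : Int) := by omega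
  unfold pvOkB
  rw [show PySem.List.pyRange 0 3 1 = [0, 1, 2] from by decide]
  rw [hnj, pv_get_pre cs i hi, pv_get_pre cs (cs.length - j) (by omega)]
  simp only [List.all_cons, List.all_nil, Bool.and_true, Bool.and_eq_true, decide_eq_true_eq,
    Option.getD_some]
  unfold pvFeas pvOut
  rw [pv_cnt_append, pv_cnt_append, pv_cnt_append]
  rw [pv_cnt_drop 0 cs (cs.length - j), pv_cnt_drop 1 cs (cs.length - j),
      pv_cnt_drop 2 cs (cs.length - j)]
  simp only [pvVec]
  simp [PySem.List.pyGet?, PySem.List.pyIdx?]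
  omega

theorem pv_bsearch_spec (pre : List (List Int)) (total : List Int) (k n i : Int) :
    ∀ (N : Nat) (lo hi : Int), (hi - lo).toNat ≤ N → lo ≤ hi →
      (∀ x y, lo ≤ x → x ≤ y → y ≤ hi →
        pvOkB pre total k n i x = true → pvOkB pre total k n i y = true) →
      pvOkB pre total k n i hi = true →
      lo ≤ pvBsearch pre total k n i lo hi ∧ pvBsearch pre total k n i lo hi ≤ hi ∧
      pvOkB pre total k n i (pvBsearch pre total k n i lo hi) = true ∧
      (∀ x, lo ≤ x → x < pvBsearch pre total k n i lo hi → pvOkB pre total k n i x ≠ true) := by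
  intro N
  induction N with
  | zero =>
    intro lo hi hN hle _ hhi
    have : lo = hi := by omega
    subst this
    rw [pvBsearch, dif_neg (by omega)]
    exact ⟨le_refl _, le_refl _, hhi, fun x h1 h2 => by omega⟩
  | succ N ih =>
    intro lo hi hN hle hmono hhi
    by_cases hlt : lo < hi
    · have hmid := PySem.Int.floordiv_two_mid_bounds (le_of_lt hlt)
      have hmidlt : PySem.Int.floordiv (lo + hi) 2 < hi := by
        rw [PySem.Int.floordiv_lt_iff_lt_mul (by norm_num)]; omega
      set mid := PySem.Int.floordiv (lo + hi) 2 with hmiddef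
      by_cases hok : pvOkB pre total k n i mid = true
      · have hrec := ih lo mid (by omega) (by omega)
          (fun x y h1 h2 h3 => hmono x y h1 h2 (by omega)) hok
        rw [pvBsearch, dif_pos hlt, ← hmiddef, if_pos hok]
        exact ⟨hrec.1, by omega, hrec.2.2.1, hrec.2.2.2⟩
      · have hrec := ih (mid + 1) hi (by omega) (by omega)
          (fun x y h1 h2 h3 => hmono x y (by omega) h2 h3) hhi
        rw [pvBsearch, dif_pos hlt, ← hmiddef, if_neg hok]
        refine ⟨by omega, hrec.2.1, hrec.2.2.1, ?_⟩
        intro x h1 h2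
        rcases Int.lt_or_le x (mid + 1) with h | h
        · intro hx
          exact hok (hmono x mid h1 (by omega) (by omega) hx)
        · exact hrec.2.2.2 x h h2
    · have : lo = hi := by omega
      subst this
      rw [pvBsearch, dif_neg (by omega)]
      exact ⟨le_refl _, le_refl _, hhi, fun x h1 h2 => by omega⟩

-- fold-min facts for B's outer loop
theorem pv_foldl_min_le_init (g : Int → Int) (L : List Int) :
    ∀ (a : Int), L.foldl (fun b i => min b (g i)) a ≤ a := by
  induction L with
  | nil => intro a; simp
  | cons x rest ih =>
    intro a
    simp only [List.foldl_cons]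
    exact le_trans (ih (min a (g x))) (min_le_left _ _)

theorem pv_foldl_min_le_mem (g : Int → Int) (L : List Int) :
    ∀ (a : Int) (x : Int), x ∈ L → L.foldl (fun b i => min b (g i)) a ≤ g x := by
  induction L with
  | nil => intro a x h; simp at h
  | cons y rest ih =>
    intro a x h
    simp only [List.foldl_cons]
    rcases List.mem_cons.mp h with rfl | h
    · exact le_trans (pv_foldl_min_le_init g rest _) (min_le_right _ _)
    · exact ih _ x h

theorem pv_foldl_min_ach (g : Int → Int) (L : List Int) :
    ∀ (a : Int), L.foldl (fun b i => min b (g i)) a = a ∨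
      ∃ x ∈ L, L.foldl (fun b i => min b (g i)) a = g x := by
  induction L with
  | nil => intro a; exact Or.inl rfl
  | cons y rest ih =>
    intro a
    simp only [List.foldl_cons]
    rcases ih (min a (g y)) with h | ⟨x, hx, hh⟩
    · rcases min_choice a (g y) with h' | h'
      · exact Or.inl (h.trans h')
      · exact Or.inr ⟨y, by simp, h.trans h'⟩
    · exact Or.inr ⟨x, by simp [hx], hh⟩

-- ===== VERDICT (by name: the statement is the Claim_ definition above) =====
-- anti-monotonicity of feasibility in the window end, iterated
theorem pv_feas_anti_m (cs : List Char) (k : Int) (l : Nat) :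
    ∀ (m' m : Nat), m ≤ m' → pvFeas cs k l m' → pvFeas cs k l m := by
  intro m'
  induction m' with
  | zero => intro m h hf; rw [Nat.le_zero.mp h]; exact hf
  | succ mm ih =>
    intro m h hf
    rcases Nat.eq_or_lt_of_le h with rfl | hlt
    · exact hf
    · exact ih m (by omega) (pv_feas_mono_m cs k l mm hf)

-- B's binary search, specialized: it returns the least feasible right take size
theorem pv_bsearch_char (cs : List Char) (k : Int)
    (htot : k ≤ pvCnt 0 cs ∧ k ≤ pvCnt 1 cs ∧ k ≤ pvCnt 2 cs)
    (i : Nat) (hi : i ≤ cs.length) :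
    ∃ (J : Nat), J ≤ cs.length - i ∧ pvFeas cs k i (cs.length - J) ∧
      (∀ j' : Nat, j' < J → ¬ pvFeas cs k i (cs.length - j')) ∧
      pvBsearch (pvPre cs) (pvVec cs) k (cs.length : Int) (i : Int) 0
        ((cs.length : Int) - (i : Int)) = (J : Int) := by
  have hhi : (0 : Int) ≤ (cs.length : Int) - (i : Int) := by omega
  have hmono : ∀ x y, (0 : Int) ≤ x → x ≤ y → y ≤ (cs.length : Int) - (i : Int) →
      pvOkB (pvPre cs) (pvVec cs) k (cs.length : Int) (i : Int) x = true →
      pvOkB (pvPre cs) (pvVec cs) k (cs.length : Int) (i : Int) y = true := by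
    intro x y hx hxy hyn hokx
    have hxn : x = ((x.toNat : Nat) : Int) := by omega
    have hyn2 : y = ((y.toNat : Nat) : Int) := by omega
    rw [hxn] at hokx
    rw [hyn2]
    have h1 := (pv_okB_iff cs k i x.toNat hi (by omega)).mp hokx
    refine (pv_okB_iff cs k i y.toNat hi (by omega)).mpr ?_
    exact pv_feas_anti_m cs k i (cs.length - x.toNat) (cs.length - y.toNat) (by omega) h1
  have hokhi : pvOkB (pvPre cs) (pvVec cs) k (cs.length : Int) (i : Int)
      ((cs.length : Int) - (i : Int)) = true := by
    rw [show (cs.length : Int) - (i : Int) = ((cs.length - i : Nat) : Int) from by omega]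
    refine (pv_okB_iff cs k i (cs.length - i) hi (le_refl _)).mpr ?_
    rw [show cs.length - (cs.length - i) = i from by omega]
    exact pv_feas_mm cs k htot i
  obtain ⟨hJ1, hJ2, hJ3, hJ4⟩ :=
    pv_bsearch_spec (pvPre cs) (pvVec cs) k (cs.length : Int) (i : Int)
      ((cs.length : Int) - (i : Int) - 0).toNat 0 ((cs.length : Int) - (i : Int))
      (le_refl _) hhi hmono hokhi
  set r := pvBsearch (pvPre cs) (pvVec cs) k (cs.length : Int) (i : Int) 0
    ((cs.length : Int) - (i : Int)) with hr
  refine ⟨r.toNat, by omega, ?_, ?_, by omega⟩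
  · have : r = ((r.toNat : Nat) : Int) := by omega
    rw [this] at hJ3
    exact (pv_okB_iff cs k i r.toNat hi (by omega)).mp hJ3
  · intro j' hj'
    have hne := hJ4 (j' : Int) (by omega) (by omega)
    intro hf
    exact hne ((pv_okB_iff cs k i j' hi (by omega)).mpr hf)

-- ===== VERDICT (by name: the statement is the Claim_ definition above) =====
theorem takeCharacters_spec : Claim_equal_takeCharacters := by
  unfold Claim_equal_takeCharacters
  intro s k _ hpre
  unfold Spec_takeCharacters takeCharacters takeCharacters_alt
  have hg : pvGood s.toList := by
    intro c hc
    have := List.all_eq_true.mp hpre c hc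
    simp only [Bool.and_eq_true, decide_eq_true_eq] at this
    exact this
  set cs := s.toList with hcs
  have hphase1 : cs.foldl (fun cnt c => pvBump3 cnt ((c.toNat : Int) - 97) 1) [0, 0, 0]
      = pvVec cs := by
    have := pv_phase1 cs [] hg
    rw [pv_vec_nil] at this
    simpa using this
  have hpre_build := pv_pre_build cs hg
  have htotB : PySem.List.pyGet? (pvPre cs) ((cs.length : Nat) : Int) = some (pvVec cs) := by
    have := pv_get_pre cs cs.length (le_refl _)
    rwa [List.take_length] at this
  simp only [hphase1, hpre_build, htotB, Option.getD_some]
  by_cases hlow : pvMin0 (pvVec cs) < k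
  · rw [if_pos hlow, if_pos hlow]
  · rw [if_neg hlow, if_neg hlow]
    have htot : k ≤ pvCnt 0 cs ∧ k ≤ pvCnt 1 cs ∧ k ≤ pvCnt 2 cs := by
      have := (pv_min_vec cs k).not.mp hlow
      push_neg at this
      omega
    obtain ⟨w, hw0, hub, hach, hfoldw⟩ := pv_A_char cs k hg htot
    rw [hfoldw]
    apply le_antisymm
    · -- A's value is at most B's: B's fold lands on n or on a feasible pair
      rcases pv_foldl_min_ach
          (fun i => i + pvBsearch (pvPre cs) (pvVec cs) k (cs.length : Int) i 0
            ((cs.length : Int) - i))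
          (PySem.List.pyRange 0 ((cs.length : Int) + 1) 1) ((cs.length : Nat) : Int) with h | ⟨x, hx, h⟩
      · rw [h]; omega
      · rw [h]
        obtain ⟨hx0, hxn⟩ := PySem.List.mem_pyRange_one.mp hx
        have hxeq : x = ((x.toNat : Nat) : Int) := by omega
        obtain ⟨J, hJ1, hJ2, _, hJeq⟩ :=
          pv_bsearch_char cs k htot x.toNat (by omega)
        show (cs.length : Int) - w ≤
          x + pvBsearch (pvPre cs) (pvVec cs) k (cs.length : Int) x 0 ((cs.length : Int) - x)
        rw [hxeq, hJeq]
        have := hub (cs.length - J) x.toNat (by omega) (by omega) hJ2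
        omega
    · -- B's value is at most A's: A's value is n (then B ≤ n) or a feasible pair,
      -- on which B's binary search does at least as well
      have hinit := pv_foldl_min_le_init
          (fun i => i + pvBsearch (pvPre cs) (pvVec cs) k (cs.length : Int) i 0
            ((cs.length : Int) - i))
          (PySem.List.pyRange 0 ((cs.length : Int) + 1) 1) ((cs.length : Nat) : Int)
      rcases hach with rfl | ⟨m', x, a1, a2, a3, rfl⟩
      · omega
      · have hmem : ((x : Nat) : Int) ∈ PySem.List.pyRange 0 ((cs.length : Int) + 1) 1 :=
          PySem.List.mem_pyRange_one.mpr ⟨by omega, by omega⟩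
        have hle := pv_foldl_min_le_mem
          (fun i => i + pvBsearch (pvPre cs) (pvVec cs) k (cs.length : Int) i 0
            ((cs.length : Int) - i))
          (PySem.List.pyRange 0 ((cs.length : Int) + 1) 1) ((cs.length : Nat) : Int)
          ((x : Nat) : Int) hmem
        obtain ⟨J, hJ1, _, hJ3, hJeq⟩ := pv_bsearch_char cs k htot x (by omega)
        have hJle : J ≤ cs.length - m' := by
          by_contra hgt
          push_neg at hgt
          have hmin := hJ3 (cs.length - m') hgt
          rw [show cs.length - (cs.length - m') = m' from by omega] at hmin
          exact hmin a3
        refine le_trans hle ?_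
        show ((x : Nat) : Int) + pvBsearch (pvPre cs) (pvVec cs) k (cs.length : Int)
            ((x : Nat) : Int) 0 ((cs.length : Int) - ((x : Nat) : Int)) ≤ _
        rw [hJeq]
        omega
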